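-- pv_equiv track=rewrite | github.com/dizzydroid/ASU_SeniorProject_DSA | src/modules/xml_parser.py | extract_tag
-- ===== SOURCE A (Python) =====
-- def extract_tag(line, start):
--     # Extract tag from line
--     tag = ""
--     for char in line[start:]:
--         if char == ' ' or char == '>':
--             break
--         elif char == '<':
--             continue
--         tag += char
--     return tag
-- ===== SOURCE B (Python) =====
-- def extract_tag(line, start):
--     # Two separate passes: cut the suffix at the first delimiter, then drop every '<'.
--     sub = line[start:]
--     prefix = sub.split(' ')[0].split('>')[0]
--     return prefix.replace('<', '')
-- ===== Notes on version B (the rewrite author's own statement) =====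
-- stated objective: simpler
-- what changed: Replaces A's single interleaved character loop (break/continue/accumulate with string +=) by two separate library passes: cut line[start:] at the first ' ' or '>' via split, then strip '<' via replace.
import Mathlib
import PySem

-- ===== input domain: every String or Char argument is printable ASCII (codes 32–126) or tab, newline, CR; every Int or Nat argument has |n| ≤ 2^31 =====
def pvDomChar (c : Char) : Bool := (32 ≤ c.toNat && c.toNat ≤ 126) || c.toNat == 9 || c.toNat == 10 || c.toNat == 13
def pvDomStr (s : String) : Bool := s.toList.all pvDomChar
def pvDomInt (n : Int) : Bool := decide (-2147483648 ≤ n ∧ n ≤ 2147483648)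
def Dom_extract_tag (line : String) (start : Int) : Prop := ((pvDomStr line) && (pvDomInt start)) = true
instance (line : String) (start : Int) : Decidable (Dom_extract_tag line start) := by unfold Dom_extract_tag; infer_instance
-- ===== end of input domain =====

-- B replaces A's single interleaved char loop (break/continue/accumulate) by two separate library passes: split at the first delimiter, then remove '<'; same cost, simpler.

-- ===== PORT A =====
-- the for-loop over line[start:] with break/continue, tag accumulated left to right
def extractLoopA : List Char → List Char → List Char
  | [], tag => tag
  | c :: cs, tag =>
    if c = ' ' ∨ c = '>' then tag
    else if c = '<' then extractLoopA cs tag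
    else extractLoopA cs (tag ++ [c])

def extract_tag (line : String) (start : Int) : String :=
  String.ofList (extractLoopA (PySem.Str.slice line (some start) none).toList [])

-- ===== PORT B =====
def extract_tag_alt (line : String) (start : Int) : String :=
  let sub := (PySem.Str.slice line (some start) none).toList    -- line[start:]
  let pre := ((PySem.Chars.splitOn sub [' ']).headD [])         -- sub.split(' ')[0]
  let pre2 := ((PySem.Chars.splitOn pre ['>']).headD [])        -- .split('>')[0]
  String.ofList (PySem.Chars.replace pre2 ['<'] [])             -- .replace('<', '')

-- ===== PRECONDITION & SPEC =====
def Spec_extract_tag (line : String) (start : Int) (out : String) : Prop := out = extract_tag_alt line start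
instance (line : String) (start : Int) (out : String) : Decidable (Spec_extract_tag line start out) := by unfold Spec_extract_tag; infer_instance

-- ===== CLAIM (what is proved, stated in full; the proofs are below) =====
def Claim_equal_extract_tag : Prop := ∀ (line : String) (start : Int), Dom_extract_tag line start → Spec_extract_tag line start (extract_tag line start)

-- ===== LEMMAS AND PROOFS =====

theorem splitOn_go_acc (sep : List Char) (fuel : Nat) : ∀ (l cur : List Char) (acc : List (List Char)),
    PySem.Chars.splitOn.go sep fuel l cur acc
      = acc.reverse ++ PySem.Chars.splitOn.go sep fuel l cur [] := by
  induction fuel with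
  | zero => intro l cur acc; simp [PySem.Chars.splitOn.go]
  | succ f ih =>
    intro l cur acc
    cases l with
    | nil => simp [PySem.Chars.splitOn.go]
    | cons c rest =>
      simp only [PySem.Chars.splitOn.go]
      split
      · rw [ih _ _ (cur.reverse :: acc), ih _ _ [cur.reverse]]
        simp
      · exact ih _ _ acc

theorem splitOn_go_head (c : Char) : ∀ (l : List Char) (fuel : Nat) (cur : List Char),
    l.length ≤ fuel →
    (PySem.Chars.splitOn.go [c] fuel l cur []).headD []
      = cur.reverse ++ l.takeWhile (· ≠ c) := by
  intro l
  induction l with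
  | nil => intro fuel cur h; cases fuel <;> simp [PySem.Chars.splitOn.go]
  | cons a rest ih =>
    intro fuel cur h
    cases fuel with
    | zero => simp at h
    | succ f =>
      simp only [PySem.Chars.splitOn.go]
      split
      · rename_i hp
        have ha : a = c := by
          simp [List.isPrefixOf] at hp; exact hp.symm
        rw [splitOn_go_acc]
        simp [ha]
      · rename_i hp
        have ha : ¬ a = c := by
          simp [List.isPrefixOf] at hp; intro h'; exact hp h'.symm
        rw [ih f (a :: cur) (by simpa using Nat.lt_succ_iff.mp (by simpa using h))]
        simp [ha]

theorem splitOn_head (c : Char) (s : List Char) :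
    (PySem.Chars.splitOn s [c]).headD [] = s.takeWhile (· ≠ c) := by
  unfold PySem.Chars.splitOn
  rw [splitOn_go_head c s (s.length + 1) [] (by omega)]
  simp

theorem replace_go_single (c : Char) : ∀ (l : List Char) (fuel : Nat) (acc : List Char),
    l.length ≤ fuel →
    PySem.Chars.replace.go [c] [] fuel l acc = acc.reverse ++ l.filter (· ≠ c) := by
  intro l
  induction l with
  | nil => intro fuel acc h; cases fuel <;> simp [PySem.Chars.replace.go]
  | cons a rest ih =>
    intro fuel acc h
    cases fuel with
    | zero => simp at h
    | succ f =>
      simp only [PySem.Chars.replace.go]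
      split
      · rename_i hp
        have ha : a = c := by simp [List.isPrefixOf] at hp; exact hp.symm
        simp only [List.length_singleton, List.drop_one, List.tail_cons, List.reverse_nil,
          List.nil_append]
        rw [ih f acc (by simpa using h)]
        simp [ha]
      · rename_i hp
        have ha : ¬ a = c := by simp [List.isPrefixOf] at hp; intro h'; exact hp h'.symm
        rw [ih f (a :: acc) (by simpa using h)]
        simp [ha]

theorem replace_single (c : Char) (s : List Char) :
    PySem.Chars.replace s [c] [] = s.filter (· ≠ c) := by
  unfold PySem.Chars.replace
  rw [if_neg (by simp)]
  rw [replace_go_single c s s.length [] (le_refl _)]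
  simp

theorem extractLoopA_eq (l : List Char) : ∀ (tag : List Char),
    extractLoopA l tag
      = tag ++ (((l.takeWhile (· ≠ ' ')).takeWhile (· ≠ '>')).filter (· ≠ '<')) := by
  induction l with
  | nil => intro tag; simp [extractLoopA]
  | cons a rest ih =>
    intro tag
    simp only [extractLoopA]
    by_cases h1 : a = ' ' ∨ a = '>'
    · rw [if_pos h1]
      rcases h1 with h | h <;> simp [h, List.takeWhile_cons]
    · rw [if_neg h1]
      push_neg at h1
      by_cases h2 : a = '<'
      · rw [if_pos h2, ih]
        simp [List.takeWhile_cons, h1.1, h1.2, h2, List.filter_cons]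
      · rw [if_neg h2, ih]
        simp [List.takeWhile_cons, h1.1, h1.2, h2, List.filter_cons]

-- ===== VERDICT (by name: the statement is the Claim_ definition above) =====
theorem extract_tag_spec : Claim_equal_extract_tag := by
  intro line start _
  unfold Spec_extract_tag extract_tag extract_tag_alt
  simp only [splitOn_head, replace_single, extractLoopA_eq, List.nil_append]
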